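-- pv_equiv track=rewrite | github.com/DaimDN/Code-Assistant-API-Fine-Tunning | main.py | analyze_code_content
-- ===== SOURCE A (Python) =====
-- def analyze_code_content(content):
--     analysis = []
--     lines = content.split('\n')
--
--     current_block = []
--     for line in lines:
--         if line.strip().startswith('def ') or line.strip().startswith('class '):
--             if current_block:
--                 analysis.append(' '.join(current_block))
--             current_block = [line.strip()]
--         elif line.strip() and current_block:
--             current_block.append(line.strip())
--
--     if current_block:
--         analysis.append(' '.join(current_block))
--
--     return '\n'.join(analysis)
-- ===== SOURCE B (Python) =====
-- def _is_marker(l):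
--     return l.startswith('def ') or l.startswith('class ')
--
--
-- def analyze_code_content(content):
--     cleaned = [s for s in (l.strip() for l in content.split('\n')) if s]
--     n = len(cleaned)
--     i = 0
--     while i < n and not _is_marker(cleaned[i]):
--         i += 1
--     parts = []
--     while i < n:
--         j = i + 1
--         while j < n and not _is_marker(cleaned[j]):
--             j += 1
--         parts.append(' '.join(cleaned[i:j]))
--         i = j
--     return '\n'.join(parts)
-- ===== Notes on version B (the rewrite author's own statement) =====
-- stated objective: alternative
-- what changed: B replaces A's running current_block accumulator with a flush-on-marker step by a boundary scan: it builds the cleaned stripped non-blank line list once, skips lines before the first def/class, then repeatedly scans for the next marker and joins the slice between consecutive markers; each line is stripped once instead of up to four times.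
import Mathlib
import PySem

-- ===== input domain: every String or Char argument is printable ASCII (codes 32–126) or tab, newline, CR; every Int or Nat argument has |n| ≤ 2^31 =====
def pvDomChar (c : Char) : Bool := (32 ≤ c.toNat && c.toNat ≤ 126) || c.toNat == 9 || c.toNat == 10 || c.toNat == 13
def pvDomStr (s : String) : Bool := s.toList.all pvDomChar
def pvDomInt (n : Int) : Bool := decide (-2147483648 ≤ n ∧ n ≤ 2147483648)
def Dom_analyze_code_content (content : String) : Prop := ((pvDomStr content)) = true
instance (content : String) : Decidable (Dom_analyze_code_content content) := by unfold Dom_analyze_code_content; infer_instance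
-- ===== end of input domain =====

-- B groups the cleaned line list by scanning for def/class boundaries and slicing, instead of
-- A's running current_block accumulator with flush-on-marker; same return value everywhere.

-- ===== PORT A =====
-- one loop iteration of A: state = (analysis, current_block)
def pvStepA (st : List String × List String) (line : String) : List String × List String :=
  if PySem.Str.startswith (PySem.Str.strip line) "def " ||
     PySem.Str.startswith (PySem.Str.strip line) "class " then
    ((if st.2.isEmpty then st.1 else st.1 ++ [PySem.Str.join " " st.2]), [PySem.Str.strip line])
  else if PySem.Str.strip line ≠ "" ∧ st.2 ≠ [] then
    (st.1, st.2 ++ [PySem.Str.strip line])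
  else st

def analyze_code_content (content : String) : String :=
  let lines := (PySem.Str.split? content "\n").getD []   -- sep "\n" ≠ "", so split? is some
  let st := lines.foldl pvStepA ([], [])
  let analysis := if st.2.isEmpty then st.1 else st.1 ++ [PySem.Str.join " " st.2]
  PySem.Str.join "\n" analysis

-- ===== PORT B =====
def pvIsMarker (l : String) : Bool :=
  PySem.Str.startswith l "def " || PySem.Str.startswith l "class "

-- B's first while loop: advance past the lines before the first def/class
def pvSkipPre : List String → List String
  | [] => []
  | l :: ls => if pvIsMarker l then l :: ls else pvSkipPre ls

-- B's outer while loop: the inner j scan for the next marker is the takeWhile of the tail,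
-- ' '.join(cleaned[i:j]) is the join of the head and that body, i = j is the drop
def pvBlocks : List String → List String
  | [] => []
  | l :: ls =>
    let body := ls.takeWhile (fun x => !pvIsMarker x)
    PySem.Str.join " " (l :: body) :: pvBlocks (ls.drop body.length)
termination_by ls => ls.length
decreasing_by simp

def analyze_code_content_alt (content : String) : String :=
  let cleaned := (((PySem.Str.split? content "\n").getD []).map PySem.Str.strip).filter
    (fun s => s ≠ "")
  PySem.Str.join "\n" (pvBlocks (pvSkipPre cleaned))

-- ===== PRECONDITION & SPEC =====
def Spec_analyze_code_content (content : String) (out : String) : Prop := out = analyze_code_content_alt content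
instance (content : String) (out : String) : Decidable (Spec_analyze_code_content content out) := by unfold Spec_analyze_code_content; infer_instance

-- ===== CLAIM (what is proved, stated in full; the proofs are below) =====
def Claim_equal_analyze_code_content : Prop := ∀ (content : String), Dom_analyze_code_content content → Spec_analyze_code_content content (analyze_code_content content)

-- ===== LEMMAS AND PROOFS =====

-- A's step, expressed on the already-stripped line
def pvStepC (st : List String × List String) (s : String) : List String × List String :=
  if pvIsMarker s then
    ((if st.2.isEmpty then st.1 else st.1 ++ [PySem.Str.join " " st.2]), [s])
  else if s ≠ "" ∧ st.2 ≠ [] then (st.1, st.2 ++ [s])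
  else st

def pvFinish (st : List String × List String) : List String :=
  if st.2.isEmpty then st.1 else st.1 ++ [PySem.Str.join " " st.2]

theorem pvStepA_eq (st : List String × List String) (l : String) :
    pvStepA st l = pvStepC st (PySem.Str.strip l) := by
  simp only [pvStepA, pvStepC, pvIsMarker]
  rfl

theorem foldA_eq_foldC (lines : List String) (st : List String × List String) :
    lines.foldl pvStepA st = (lines.map PySem.Str.strip).foldl pvStepC st := by
  induction lines generalizing st with
  | nil => simp
  | cons l ls ih =>
    rw [List.map_cons, List.foldl_cons, List.foldl_cons, pvStepA_eq, ih]

theorem pvStepC_empty (st : List String × List String) : pvStepC st "" = st := by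
  have h : pvIsMarker "" = false := by decide
  simp [pvStepC, h]

theorem foldC_filter (ss : List String) (st : List String × List String) :
    ss.foldl pvStepC st = (ss.filter (fun s => s ≠ "")).foldl pvStepC st := by
  induction ss generalizing st with
  | nil => rfl
  | cons s ss ih =>
    by_cases h : s = "" <;>
      simp [h, List.foldl_cons, pvStepC_empty, ih]

theorem pvBlocks_nil : pvBlocks [] = [] := by
  simp [pvBlocks]

theorem drop_takeWhile_len (p : String → Bool) (ls : List String) :
    ls.drop (ls.takeWhile p).length = ls.dropWhile p := by
  induction ls with
  | nil => rfl
  | cons l ls ih =>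
    by_cases h : p l <;> simp [h, ih]

theorem pvBlocks_cons (l : String) (ls : List String) :
    pvBlocks (l :: ls) =
      PySem.Str.join " " (l :: ls.takeWhile (fun x => !pvIsMarker x)) ::
        pvBlocks (ls.dropWhile (fun x => !pvIsMarker x)) := by
  rw [pvBlocks.eq_def]
  dsimp only
  rw [drop_takeWhile_len]

theorem foldC_ne (ls : List String) (acc cur : List String) (hcur : cur ≠ [])
    (hne : ∀ l ∈ ls, l ≠ "") :
    pvFinish (ls.foldl pvStepC (acc, cur)) =
      acc ++ PySem.Str.join " " (cur ++ ls.takeWhile (fun x => !pvIsMarker x)) ::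
        pvBlocks (ls.dropWhile (fun x => !pvIsMarker x)) := by
  induction ls generalizing acc cur with
  | nil => simp [pvFinish, hcur, pvBlocks_nil]
  | cons l ls ih =>
    have hl : l ≠ "" := hne l (by simp)
    have hls : ∀ x ∈ ls, x ≠ "" := fun x hx => hne x (by simp [hx])
    by_cases hm : pvIsMarker l
    · simp only [List.foldl_cons, pvStepC, hm, if_pos]
      rw [if_neg (by simp [hcur])]
      rw [ih _ _ (by simp) hls]
      simp [hm, pvBlocks_cons]
    · simp only [List.foldl_cons, pvStepC, hm, Bool.false_eq_true, if_neg, not_false_iff]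
      rw [if_pos ⟨hl, hcur⟩, ih _ _ (by simp [hcur]) hls]
      simp [hm]

theorem foldC_empty (ls : List String) (acc : List String) (hne : ∀ l ∈ ls, l ≠ "") :
    pvFinish (ls.foldl pvStepC (acc, [])) = acc ++ pvBlocks (pvSkipPre ls) := by
  induction ls generalizing acc with
  | nil => simp [pvFinish, pvBlocks_nil, pvSkipPre]
  | cons l ls ih =>
    have hls : ∀ x ∈ ls, x ≠ "" := fun x hx => hne x (by simp [hx])
    by_cases hm : pvIsMarker l
    · simp only [List.foldl_cons, pvStepC, hm, if_pos, List.isEmpty_nil]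
      rw [foldC_ne ls acc [l] (by simp) hls]
      simp [pvSkipPre, hm, pvBlocks_cons]
    · simp only [List.foldl_cons, pvStepC, hm, Bool.false_eq_true, if_neg, not_false_iff]
      rw [if_neg (by simp), ih _ hls]
      simp [pvSkipPre, hm]

theorem pvFinish_eq (st : List String × List String) :
    (if st.2.isEmpty then st.1 else st.1 ++ [PySem.Str.join " " st.2]) = pvFinish st := rfl

-- ===== VERDICT (by name: the statement is the Claim_ definition above) =====
theorem analyze_code_content_spec : Claim_equal_analyze_code_content := by
  intro content _
  unfold Spec_analyze_code_content analyze_code_content analyze_code_content_alt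
  dsimp only
  rw [foldA_eq_foldC, pvFinish_eq, foldC_filter,
    foldC_empty _ [] (by intro l hl; simp at hl; exact hl.2)]
  simp
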